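-- pv_equiv track=rewrite | github.com/Windsooon/LeetCode | Decode Ways II.py | numDecodings1
-- ===== SOURCE A (Python) =====
-- def numDecodings1(S):
--     MOD = 10**9 + 7
--     e0, e1, e2 = 1, 0, 0
--     for c in S:
--         if c == '*':
--             f0 = 9*e0 + 9*e1 + 6*e2
--             f1 = e0
--             f2 = e0
--         else:
--             f0 = (c > '0') * e0 + e1 + (c <= '6') * e2
--             f1 = (c == '1') * e0
--             f2 = (c == '2') * e0
--         e0, e1, e2 = f0 % MOD, f1, f2
--     return e0
-- ===== SOURCE B (Python) =====
-- def numDecodings1(S):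
--     MOD = 10**9 + 7
--
--     def single(c):
--         return 9 if c == '*' else (1 if c > '0' else 0)
--
--     def pair(a, b):
--         one = a == '1' or a == '*'
--         two = a == '2' or a == '*'
--         if b == '*':
--             return 9 * one + 6 * two
--         return 1 * one + (b <= '6') * two
--
--     if not S:
--         return 1
--     dp0, dp1, prev = 1, single(S[0]), S[0]
--     for c in S[1:]:
--         dp0, dp1, prev = dp1, (dp1 * single(c) + dp0 * pair(prev, c)) % MOD, c
--     return dp1
-- ===== Notes on version B (the rewrite author's own statement) =====
-- stated objective: alternative
-- what changed: Replaced A's forward propagation of three flag accumulators (e0,e1,e2 pushed ahead by per-branch coefficient updates) with a classic look-back DP dp2 = dp1*single(cur) + dp0*pair(prev,cur) using two helper functions counting single-char and char-pair decodings.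
import Mathlib
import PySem

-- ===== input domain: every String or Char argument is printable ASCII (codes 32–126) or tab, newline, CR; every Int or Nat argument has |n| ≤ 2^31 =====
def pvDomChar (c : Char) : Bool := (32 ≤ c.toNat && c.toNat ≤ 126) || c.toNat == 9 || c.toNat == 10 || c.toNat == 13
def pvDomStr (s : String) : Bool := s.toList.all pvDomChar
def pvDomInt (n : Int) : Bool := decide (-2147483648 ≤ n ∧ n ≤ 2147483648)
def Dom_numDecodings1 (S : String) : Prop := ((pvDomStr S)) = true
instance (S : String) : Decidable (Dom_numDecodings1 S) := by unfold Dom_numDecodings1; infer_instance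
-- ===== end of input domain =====

-- B replaces A's forward three-flag state propagation by a classic look-back DP
-- (dp0, dp1, prev) with single-char / char-pair count helpers (objective: alternative).

-- ===== PORT A =====
-- A's loop body: state (e0, e1, e2)
def pvStepA (e : Int × Int × Int) (c : Char) : Int × Int × Int :=
  if c = '*' then
    (PySem.Int.mod (9 * e.1 + 9 * e.2.1 + 6 * e.2.2) (10 ^ 9 + 7), e.1, e.1)
  else
    (PySem.Int.mod ((if c > '0' then (1 : Int) else 0) * e.1 + e.2.1
        + (if c ≤ '6' then (1 : Int) else 0) * e.2.2) (10 ^ 9 + 7),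
     (if c = '1' then e.1 else 0), (if c = '2' then e.1 else 0))

def numDecodings1 (S : String) : Int :=
  (S.toList.foldl pvStepA (1, 0, 0)).1

-- ===== PORT B =====
def pvSingle (c : Char) : Int :=
  if c = '*' then 9 else if c > '0' then 1 else 0

def pvPair (a b : Char) : Int :=
  let one : Int := if a = '1' ∨ a = '*' then 1 else 0
  let two : Int := if a = '2' ∨ a = '*' then 1 else 0
  if b = '*' then 9 * one + 6 * two
  else 1 * one + (if b ≤ '6' then 1 else 0) * two

-- B's loop body: state (dp0, dp1, prev)
def pvStepB (st : Int × Int × Char) (c : Char) : Int × Int × Char :=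
  (st.2.1, PySem.Int.mod (st.2.1 * pvSingle c + st.1 * pvPair st.2.2 c) (10 ^ 9 + 7), c)

def numDecodings1_alt (S : String) : Int :=
  match S.toList with
  | [] => 1
  | c0 :: rest => (rest.foldl pvStepB (1, pvSingle c0, c0)).2.1

-- ===== PRECONDITION & SPEC =====
def Spec_numDecodings1 (S : String) (out : Int) : Prop := out = numDecodings1_alt S
instance (S : String) (out : Int) : Decidable (Spec_numDecodings1 S out) := by unfold Spec_numDecodings1; infer_instance

-- ===== CLAIM (what is proved, stated in full; the proofs are below) =====
def Claim_equal_numDecodings1 : Prop := ∀ (S : String), Dom_numDecodings1 S → Spec_numDecodings1 S (numDecodings1 S)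

-- ===== LEMMAS AND PROOFS =====

-- A's flag state corresponding to B's look-back state (dp0, dp1, prev)
def pvAbs (dp0 dp1 : Int) (prev : Char) : Int × Int × Int :=
  (dp1, (if prev = '1' ∨ prev = '*' then dp0 else 0),
        (if prev = '2' ∨ prev = '*' then dp0 else 0))

lemma pvStep_comm (dp0 dp1 : Int) (prev c : Char) :
    pvStepA (pvAbs dp0 dp1 prev) c =
      pvAbs dp1 (PySem.Int.mod (dp1 * pvSingle c + dp0 * pvPair prev c) (10 ^ 9 + 7)) c := by
  by_cases hc : c = '*'
  · subst hc
    simp only [pvStepA, pvAbs, pvSingle, pvPair, or_true, if_true, Prod.mk.injEq, and_true]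
    congr 1
    split_ifs <;> ring
  · simp only [pvStepA, pvAbs, pvSingle, pvPair, if_neg hc, Prod.mk.injEq]
    refine ⟨?_, ?_, ?_⟩
    · congr 1
      split_ifs <;> ring
    · by_cases h1 : c = '1' <;> simp [h1, hc]
    · by_cases h2 : c = '2' <;> simp [h2, hc]

lemma pvLoop_eq (rest : List Char) (dp0 dp1 : Int) (prev : Char) :
    (rest.foldl pvStepA (pvAbs dp0 dp1 prev)).1 =
      (rest.foldl pvStepB (dp0, dp1, prev)).2.1 := by
  induction rest generalizing dp0 dp1 prev with
  | nil => simp [pvAbs]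
  | cons c cs ih =>
    simp only [List.foldl_cons, pvStep_comm]
    exact ih _ _ _

lemma pvFirst_step (c0 : Char) : pvStepA (1, 0, 0) c0 = pvAbs 1 (pvSingle c0) c0 := by
  by_cases hc : c0 = '*'
  · subst hc
    simp only [pvStepA, pvAbs, pvSingle, or_true, if_true, Prod.mk.injEq, and_true]
    decide
  · simp only [pvStepA, pvAbs, pvSingle, if_neg hc, Prod.mk.injEq]
    refine ⟨?_, ?_, ?_⟩
    · split_ifs <;> decide
    · by_cases h1 : c0 = '1' <;> simp [h1, hc]
    · by_cases h2 : c0 = '2' <;> simp [h2, hc]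

-- ===== VERDICT (by name: the statement is the Claim_ definition above) =====
theorem numDecodings1_spec : Claim_equal_numDecodings1 := by
  intro S _
  unfold Spec_numDecodings1 numDecodings1 numDecodings1_alt
  cases h : S.toList with
  | nil => simp
  | cons c0 rest =>
    simp only [List.foldl_cons, pvFirst_step]
    exact pvLoop_eq rest 1 (pvSingle c0) c0
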